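-- pv_equiv track=rewrite | github.com/username7-maker/saas-sistema-retencao | saas-backend/app/services/import_service.py | _apply_column_mapping
-- ===== SOURCE A (Python) =====
-- def _apply_column_mapping(
--     row: dict[str, str],
--     column_mappings: dict[str, str],
--     ignored_columns: set[str],
-- ) -> dict[str, str]:
--     mapped: dict[str, str] = {}
--     for source_key, value in row.items():
--         if source_key in ignored_columns:
--             continue
--         target_key = column_mappings.get(source_key, source_key)
--         if not target_key:
--             continue
--         if target_key not in mapped or not mapped[target_key]:
--             mapped[target_key] = value
--     return mapped
-- ===== SOURCE B (Python) =====
-- def _apply_column_mapping(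
--     row: dict[str, str],
--     column_mappings: dict[str, str],
--     ignored_columns: set[str],
-- ) -> dict[str, str]:
--     groups: dict[str, list[str]] = {}
--     for source_key, value in row.items():
--         if source_key in ignored_columns:
--             continue
--         target_key = column_mappings.get(source_key, source_key)
--         if not target_key:
--             continue
--         groups.setdefault(target_key, []).append(value)
--     return {
--         target_key: next((v for v in values if v), values[0])
--         for target_key, values in groups.items()
--     }
-- ===== Notes on version B (the rewrite author's own statement) =====
-- stated objective: alternative
-- what changed: Replaces A's inline conditional dict update with a collect-then-reduce decomposition: one pass groups all values per target key into lists, a second pass picks the first truthy value per group (or the first value when none is truthy).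
import Mathlib
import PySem

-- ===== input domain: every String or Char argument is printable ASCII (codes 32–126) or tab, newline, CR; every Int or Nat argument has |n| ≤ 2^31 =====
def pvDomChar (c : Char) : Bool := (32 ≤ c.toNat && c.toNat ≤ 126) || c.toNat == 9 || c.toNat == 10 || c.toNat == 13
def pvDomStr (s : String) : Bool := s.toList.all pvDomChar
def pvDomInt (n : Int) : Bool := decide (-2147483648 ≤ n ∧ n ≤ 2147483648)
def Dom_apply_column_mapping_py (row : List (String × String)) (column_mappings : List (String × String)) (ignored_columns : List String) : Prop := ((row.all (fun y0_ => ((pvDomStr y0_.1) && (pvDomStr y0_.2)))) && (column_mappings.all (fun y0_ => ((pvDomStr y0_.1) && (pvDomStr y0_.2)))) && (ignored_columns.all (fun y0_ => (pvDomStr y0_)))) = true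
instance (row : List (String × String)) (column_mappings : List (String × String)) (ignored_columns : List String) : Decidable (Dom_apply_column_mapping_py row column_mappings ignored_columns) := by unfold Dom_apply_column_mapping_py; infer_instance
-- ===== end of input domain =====

-- B replaces A's inline conditional dict update by a collect-then-reduce decomposition
-- (group values per target key, then pick the first truthy value per group); same cost, alternative structure.

-- ===== PORT A =====
def apply_column_mapping_py (row : List (String × String)) (column_mappings : List (String × String)) (ignored_columns : List String) : List (String × String) :=
  (row.foldl (fun mapped kv =>
      if ignored_columns.contains kv.1 then mapped
      else
        let target := (PySem.Dict.mk column_mappings).getD kv.1 kv.1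
        if target == "" then mapped
        else
          match mapped.get? target with
          | none => mapped.insert target kv.2
          | some old => if old == "" then mapped.insert target kv.2 else mapped)
    PySem.Dict.empty).items

-- ===== PORT B =====
-- next((v for v in values if v), values[0]); groups' value lists are never empty, so the
-- headD default "" stands for values[0] and is never the result of an empty list in B's use.
def pvChoose (values : List String) : String :=
  match values.find? (fun v => v != "") with
  | some v => v
  | none => values.headD ""

def apply_column_mapping_py_alt (row : List (String × String)) (column_mappings : List (String × String)) (ignored_columns : List String) : List (String × String) :=
  let groups : PySem.Dict String (List String) :=
    row.foldl (fun g kv =>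
      if ignored_columns.contains kv.1 then g
      else
        let target := (PySem.Dict.mk column_mappings).getD kv.1 kv.1
        if target == "" then g
        else g.modify target [] (· ++ [kv.2]))
      PySem.Dict.empty
  groups.items.map (fun p => (p.1, pvChoose p.2))

-- ===== PRECONDITION & SPEC =====
def Spec_apply_column_mapping_py (row : List (String × String)) (column_mappings : List (String × String)) (ignored_columns : List String) (out : List (String × String)) : Prop := out = apply_column_mapping_py_alt row column_mappings ignored_columns
instance (row : List (String × String)) (column_mappings : List (String × String)) (ignored_columns : List String) (out : List (String × String)) : Decidable (Spec_apply_column_mapping_py row column_mappings ignored_columns out) := by unfold Spec_apply_column_mapping_py; infer_instance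

-- ===== CLAIM (what is proved, stated in full; the proofs are below) =====
def Claim_equal_apply_column_mapping_py : Prop := ∀ (row : List (String × String)) (column_mappings : List (String × String)) (ignored_columns : List String), Dom_apply_column_mapping_py row column_mappings ignored_columns → Spec_apply_column_mapping_py row column_mappings ignored_columns (apply_column_mapping_py row column_mappings ignored_columns)

-- ===== LEMMAS AND PROOFS =====

-- The processed (target, value) pairs both loops act on, in order.
def pvProc (column_mappings : List (String × String)) (ignored_columns : List String) (row : List (String × String)) : List (String × String) :=
  row.filterMap (fun kv =>
    if ignored_columns.contains kv.1 then none
    else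
      let target := (PySem.Dict.mk column_mappings).getD kv.1 kv.1
      if target == "" then none else some (target, kv.2))

def pvStepA (d : PySem.Dict String String) (p : String × String) : PySem.Dict String String :=
  match d.get? p.1 with
  | none => d.insert p.1 p.2
  | some old => if old == "" then d.insert p.1 p.2 else d

theorem pv_foldA_eq (cm : List (String × String)) (ig : List String) :
    ∀ (row : List (String × String)) (d : PySem.Dict String String),
      row.foldl (fun mapped kv =>
        if ig.contains kv.1 then mapped
        else
          let target := (PySem.Dict.mk cm).getD kv.1 kv.1
          if target == "" then mapped
          else
            match mapped.get? target with
            | none => mapped.insert target kv.2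
            | some old => if old == "" then mapped.insert target kv.2 else mapped) d
      = (pvProc cm ig row).foldl pvStepA d := by
  intro row
  induction row with
  | nil => intro d; simp [pvProc]
  | cons kv t ih =>
    intro d
    simp only [List.foldl_cons, pvProc, List.filterMap_cons]
    simp only [pvProc] at ih
    by_cases h1 : kv.1 ∈ ig
    · simp [h1] at ih ⊢
      exact ih d
    · by_cases h2 : (PySem.Dict.mk cm).getD kv.1 kv.1 = ""
      · simp [h1, h2] at ih ⊢
        exact ih d
      · simp [h1, h2, pvStepA] at ih ⊢
        exact ih _

theorem pv_foldB_eq (cm : List (String × String)) (ig : List String) :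
    ∀ (row : List (String × String)) (g : PySem.Dict String (List String)),
      row.foldl (fun g kv =>
        if ig.contains kv.1 then g
        else
          let target := (PySem.Dict.mk cm).getD kv.1 kv.1
          if target == "" then g
          else g.modify target [] (· ++ [kv.2])) g
      = (pvProc cm ig row).foldl (fun g p => g.modify p.1 [] (· ++ [p.2])) g := by
  intro row
  induction row with
  | nil => intro g; simp [pvProc]
  | cons kv t ih =>
    intro g
    simp only [List.foldl_cons, pvProc, List.filterMap_cons]
    simp only [pvProc] at ih
    by_cases h1 : kv.1 ∈ ig
    · simp [h1] at ih ⊢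
      exact ih g
    · by_cases h2 : (PySem.Dict.mk cm).getD kv.1 kv.1 = ""
      · simp [h1, h2] at ih ⊢
        exact ih g
      · simp [h1, h2] at ih ⊢
        exact ih _

theorem pv_keysA (L : List (String × String)) :
    ∀ (d : PySem.Dict String String),
      (L.foldl pvStepA d).keys = PySem.Set.update d.keys (L.map (·.1)) := by
  induction L with
  | nil => intro d; simp [PySem.Set.update]
  | cons p t ih =>
    intro d
    simp only [List.foldl_cons, List.map_cons, PySem.Set.update_cons]
    rw [ih]
    congr 1
    unfold pvStepA
    cases hg : d.get? p.1 with
    | none =>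
      have hc : d.contains p.1 = false := by
        rw [PySem.Dict.get?_eq_none_iff_contains] at hg; exact hg
      have hnm : p.1 ∉ d.keys := by
        intro hm
        rw [← PySem.Dict.contains_iff_mem_keys] at hm
        simp [hc] at hm
      rw [PySem.Dict.keys_insert_of_not_contains _ _ hc, PySem.Set.add_of_not_mem hnm]
    | some old =>
      have hc : d.contains p.1 = true := by
        rw [PySem.Dict.contains_eq_isSome_get?, hg]; rfl
      have hm : p.1 ∈ d.keys := (PySem.Dict.contains_iff_mem_keys _ _).mp hc
      by_cases ho : old == ""
      · simp only [ho, if_true]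
        rw [PySem.Dict.keys_insert_of_contains _ _ hc, PySem.Set.add_of_mem hm]
      · simp [ho, PySem.Set.add_of_mem hm]

theorem pv_getDA (L : List (String × String)) :
    ∀ (d : PySem.Dict String String) (c : String),
      (L.foldl pvStepA d).getD c "" =
        ((L.filter (fun p => p.1 == c)).map (·.2)).foldl
          (fun a v => if a == "" then v else a) (d.getD c "") := by
  induction L with
  | nil => intro d c; simp
  | cons p t ih =>
    intro d c
    simp only [List.foldl_cons, List.filter_cons]
    by_cases hpc : p.1 = c
    · simp only [hpc, beq_self_eq_true, if_true, List.map_cons, List.foldl_cons]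
      rw [ih]
      congr 1
      unfold pvStepA
      cases hg : d.get? c with
      | none =>
        have : d.getD c "" = "" := PySem.Dict.getD_of_get?_eq_none _ _ hg
        simp [hg, this, hpc, PySem.Dict.getD_insert_self]
      | some old =>
        have hold : d.getD c "" = old := PySem.Dict.getD_of_get?_eq_some _ _ hg
        by_cases ho : old = ""
        · simp [hg, hpc, ho, hold, PySem.Dict.getD_insert_self]
        · simp [hg, hpc, ho, hold]
    · have hbc : (p.1 == c) = false := by simp [hpc]
      simp only [hbc, Bool.false_eq_true, if_false]
      rw [ih]
      congr 1
      unfold pvStepA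
      have hcp : c ≠ p.1 := fun h => hpc h.symm
      cases hg : d.get? p.1 with
      | none => simp [PySem.Dict.getD_insert_of_ne _ _ _ hcp]
      | some old =>
        by_cases ho : old = ""
        · simp [ho, PySem.Dict.getD_insert_of_ne _ _ _ hcp]
        · simp [ho]

theorem pv_pick_eq_choose (vs : List String) :
    vs.foldl (fun a v => if a == "" then v else a) "" = pvChoose vs := by
  induction vs with
  | nil => simp [pvChoose]
  | cons h t ih =>
    by_cases hh : h = ""
    · subst hh
      have e1 : List.foldl (fun a v => if a == "" then v else a) "" ("" :: t)
          = List.foldl (fun a v => if a == "" then v else a) "" t := by simp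
      rw [e1, ih]
      unfold pvChoose
      have e2 : ("" :: t).find? (fun v => v != "") = t.find? (fun v => v != "") := by simp
      rw [e2]
      cases hf : t.find? (fun v => v != "") with
      | some v => rfl
      | none =>
        have hall : ∀ v ∈ t, v = "" := by
          intro v hv
          have := List.find?_eq_none.mp hf v hv
          simpa using this
        cases t with
        | nil => rfl
        | cons x xs => simp [hall x (by simp)]
    · have hfix : ∀ (l : List String) (a : String), a ≠ "" →
          List.foldl (fun a v => if a == "" then v else a) a l = a := by
        intro l
        induction l with
        | nil => intro a _; rfl
        | cons y ys ihy =>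
          intro a ha
          have e : List.foldl (fun a v => if a == "" then v else a) a (y :: ys)
              = List.foldl (fun a v => if a == "" then v else a) a ys := by
            simp [ha]
          rw [e]; exact ihy a ha
      have e1 : List.foldl (fun a v => if a == "" then v else a) "" (h :: t)
          = List.foldl (fun a v => if a == "" then v else a) h t := by simp
      rw [e1, hfix t h hh]
      unfold pvChoose
      simp [hh]

theorem apply_column_mapping_py_spec : Claim_equal_apply_column_mapping_py := by
  intro row cm ig _
  unfold Spec_apply_column_mapping_py apply_column_mapping_py apply_column_mapping_py_alt
  dsimp only
  rw [pv_foldA_eq, pv_foldB_eq]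
  set L := pvProc cm ig row with hL
  -- A side
  have hA_keys : (L.foldl pvStepA PySem.Dict.empty).keys = PySem.Set.ofList (L.map (·.1)) := by
    rw [pv_keysA, PySem.Dict.keys_empty, PySem.Set.update_nil_left]
  have hA_nodup : (L.foldl pvStepA PySem.Dict.empty).keys.Nodup := by
    rw [hA_keys]; exact PySem.Set.nodup_ofList _
  -- B side
  have hB_keys : ((L.foldl (fun g p => g.modify p.1 [] (· ++ [p.2])) PySem.Dict.empty)).keys
      = PySem.Set.ofList (L.map (·.1)) := by
    rw [PySem.Dict.keys_foldl_modify_key, PySem.Dict.keys_empty, PySem.Set.update_nil_left]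
  have hB_nodup : ((L.foldl (fun g p => g.modify p.1 [] (· ++ [p.2])) PySem.Dict.empty)).keys.Nodup := by
    rw [hB_keys]; exact PySem.Set.nodup_ofList _
  rw [PySem.Dict.items_eq_map_keys _ hA_nodup "",
      PySem.Dict.items_eq_map_keys _ hB_nodup []]
  rw [hA_keys, hB_keys, List.map_map]
  apply List.map_congr_left
  intro c _
  simp only [Function.comp]
  congr 1
  rw [pv_getDA, PySem.Dict.getD_empty, PySem.Dict.getD_foldl_modify_append,
      PySem.Dict.getD_empty]
  simp only [List.nil_append]
  exact pv_pick_eq_choose _
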